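-- pv_equiv track=rewrite | github.com/NeatMonster/Octogon | octogon.py | calc_ranges
-- ===== SOURCE A (Python) =====
-- def calc_ranges(indexes):
--     ranges = []
--     for index in indexes:
--         if not ranges:
--             ranges.append((index, index))
--         else:
--             last_range = ranges[-1]
--             if last_range[1] == index - 1:
--                 ranges[-1] = last_range[0], index
--             else:
--                 ranges.append((index, index))
--     return ranges
-- ===== SOURCE B (Python) =====
-- def calc_ranges(indexes):
--     # group by the constant key (value - position): a run of consecutive
--     # integers keeps that difference constant, so each key-run is one range
--     keyed = [(v - i, v) for i, v in enumerate(indexes)]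
--     out = []
--     rest = keyed
--     while rest:
--         k, first = rest[0]
--         run = [rest[0]]
--         rest = rest[1:]
--         while rest and rest[0][0] == k:
--             run.append(rest[0])
--             rest = rest[1:]
--         out.append((first, run[-1][1]))
--     return out
-- ===== Notes on version B (the rewrite author's own statement) =====
-- stated objective: alternative
-- what changed: B replaces A's compare-to-the-last-emitted-range accumulator (mutating ranges[-1]) by the derive-key-then-partition decomposition: it keys each element with value - position and splits the keyed list into maximal equal-key runs, emitting (first, last) per run.
import Mathlib
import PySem

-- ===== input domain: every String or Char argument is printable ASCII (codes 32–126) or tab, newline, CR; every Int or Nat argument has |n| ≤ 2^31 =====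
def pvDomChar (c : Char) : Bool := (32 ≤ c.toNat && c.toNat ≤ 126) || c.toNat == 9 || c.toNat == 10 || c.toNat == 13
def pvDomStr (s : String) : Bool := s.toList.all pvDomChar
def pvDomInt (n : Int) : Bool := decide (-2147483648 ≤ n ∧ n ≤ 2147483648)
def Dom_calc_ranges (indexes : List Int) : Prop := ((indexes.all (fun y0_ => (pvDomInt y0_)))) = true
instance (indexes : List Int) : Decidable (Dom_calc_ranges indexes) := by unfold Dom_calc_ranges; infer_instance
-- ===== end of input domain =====

-- B keys each element with value - position and partitions into equal-key runs (derive-key-then-partition); same value as A, no speed claim.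

-- ===== PORT A =====
-- ranges[-1] = new : replace the last element of the (nonempty) list
def pvSetLast (ranges : List (Int × Int)) (r : Int × Int) : List (Int × Int) :=
  ranges.dropLast ++ [r]

-- the for-loop over indexes, carrying the ranges accumulator in order
def pvLoopA (ranges : List (Int × Int)) (indexes : List Int) : List (Int × Int) :=
  match indexes with
  | [] => ranges
  | index :: rest =>
    match ranges.getLast? with
    | none => pvLoopA (ranges ++ [(index, index)]) rest
    | some last_range =>
      if last_range.2 == index - 1 then
        pvLoopA (pvSetLast ranges (last_range.1, index)) rest
      else
        pvLoopA (ranges ++ [(index, index)]) rest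

def calc_ranges (indexes : List Int) : List (Int × Int) := pvLoopA [] indexes

-- ===== PORT B =====
-- inner while: split the keyed list into its leading run of entries with key k and the remainder
def pvKeyRun (k : Int) : List (Int × Int) → List (Int × Int) × List (Int × Int)
  | [] => ([], [])
  | (k', v) :: tl =>
    if k' == k then ((k', v) :: (pvKeyRun k tl).1, (pvKeyRun k tl).2)
    else ([], (k', v) :: tl)

theorem pvKeyRun_snd_length (k : Int) (rest : List (Int × Int)) :
    (pvKeyRun k rest).2.length ≤ rest.length := by
  induction rest with
  | nil => exact Nat.le_refl 0
  | cons p tl ih =>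
    obtain ⟨k', v⟩ := p
    simp only [pvKeyRun]
    split
    · exact Nat.le_succ_of_le ih
    · exact Nat.le_refl _

-- outer while over the keyed list: one (first, last-of-run) per maximal equal-key run
def pvGroups : List (Int × Int) → List (Int × Int)
  | [] => []
  | (k, first) :: tl =>
    (first, (((k, first) :: (pvKeyRun k tl).1).getLast (List.cons_ne_nil _ _)).2)
      :: pvGroups (pvKeyRun k tl).2
termination_by rest => rest.length
decreasing_by exact Nat.lt_succ_of_le (pvKeyRun_snd_length k tl)

-- keyed = [(v - i, v) for i, v in enumerate(indexes)], then partition into runs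
def calc_ranges_alt (indexes : List Int) : List (Int × Int) :=
  pvGroups ((PySem.List.enumerate indexes 0).map (fun p => (p.2 - p.1, p.2)))

-- ===== PRECONDITION & SPEC =====
def Spec_calc_ranges (indexes : List Int) (out : List (Int × Int)) : Prop := out = calc_ranges_alt indexes
instance (indexes : List Int) (out : List (Int × Int)) : Decidable (Spec_calc_ranges indexes out) := by unfold Spec_calc_ranges; infer_instance

-- ===== CLAIM (what is proved, stated in full; the proofs are below) =====
def Claim_equal_calc_ranges : Prop := ∀ (indexes : List Int), Dom_calc_ranges indexes → Spec_calc_ranges indexes (calc_ranges indexes)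

-- ===== LEMMAS AND PROOFS =====

theorem pvGroups_nil : pvGroups [] = [] := pvGroups.eq_1
theorem pvGroups_cons (k first : Int) (tl : List (Int × Int)) :
    pvGroups ((k, first) :: tl) =
      (first, (((k, first) :: (pvKeyRun k tl).1).getLast (List.cons_ne_nil _ _)).2)
        :: pvGroups (pvKeyRun k tl).2 := pvGroups.eq_2 k first tl

theorem pvKeyRun_cons_pos (k k' v : Int) (tl : List (Int × Int)) (h : k' = k) :
    pvKeyRun k ((k', v) :: tl) = ((k', v) :: (pvKeyRun k tl).1, (pvKeyRun k tl).2) := by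
  simp [pvKeyRun, h]

theorem pvKeyRun_cons_neg (k k' v : Int) (tl : List (Int × Int)) (h : k' ≠ k) :
    pvKeyRun k ((k', v) :: tl) = ([], (k', v) :: tl) := by
  simp [pvKeyRun, h]

-- canonical recursion: extend the open range (a,b) through the remaining indexes
def pvExtend (a b : Int) (xs : List Int) : List (Int × Int) :=
  match xs with
  | [] => [(a, b)]
  | x :: tl => if b = x - 1 then pvExtend a x tl else (a, b) :: pvExtend x x tl

def pvKeyed (j : Int) (xs : List Int) : List (Int × Int) :=
  (PySem.List.enumerate xs j).map (fun p => (p.2 - p.1, p.2))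

theorem pvKeyed_nil (j : Int) : pvKeyed j [] = [] := by
  simp [pvKeyed, PySem.List.enumerate_nil]

theorem pvKeyed_cons (j : Int) (x : Int) (xs : List Int) :
    pvKeyed j (x :: xs) = (x - j, x) :: pvKeyed (j + 1) xs := by
  simp [pvKeyed, PySem.List.enumerate_cons]

theorem pvLoopA_append (xs : List Int) : ∀ (rs : List (Int × Int)) (a b : Int),
    pvLoopA (rs ++ [(a, b)]) xs = rs ++ pvExtend a b xs := by
  induction xs with
  | nil => intro rs a b; simp [pvLoopA, pvExtend]
  | cons x tl ih =>
    intro rs a b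
    by_cases h : b = x - 1
    · have step : pvLoopA (rs ++ [(a, b)]) (x :: tl) =
          pvLoopA (pvSetLast (rs ++ [(a, b)]) (a, x)) tl := by
        simp [pvLoopA, h]
      have hset : pvSetLast (rs ++ [(a, b)]) (a, x) = rs ++ [(a, x)] := by
        simp [pvSetLast]
      rw [step, hset, ih]
      simp [pvExtend, h]
    · have step : pvLoopA (rs ++ [(a, b)]) (x :: tl) =
          pvLoopA ((rs ++ [(a, b)]) ++ [(x, x)]) tl := by
        simp [pvLoopA, h]
      rw [step, ih]
      simp [pvExtend, h]

theorem pvGroups_keyed (xs : List Int) : ∀ (j a b : Int),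
    pvExtend a b xs =
      (a, (((b - (j - 1), b) :: (pvKeyRun (b - (j - 1)) (pvKeyed j xs)).1).getLast
            (List.cons_ne_nil _ _)).2)
        :: pvGroups (pvKeyRun (b - (j - 1)) (pvKeyed j xs)).2 := by
  induction xs with
  | nil =>
    intro j a b
    simp [pvExtend, pvKeyed_nil, pvKeyRun, pvGroups_nil]
  | cons x tl ih =>
    intro j a b
    rw [pvKeyed_cons]
    by_cases h : b = x - 1
    · have hb : b - (j - 1) = x - j := by omega
      have hx : x - (j + 1 - 1) = x - j := by ring_nf
      rw [hb, pvKeyRun_cons_pos _ _ _ _ rfl]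
      rw [show pvExtend a b (x :: tl) = pvExtend a x tl by simp [pvExtend, h]]
      rw [List.getLast_cons (List.cons_ne_nil _ _)]
      have := ih (j + 1) a x
      rw [hx] at this
      exact this
    · have hb : x - j ≠ b - (j - 1) := by omega
      have hx : x - (j + 1 - 1) = x - j := by ring_nf
      rw [pvKeyRun_cons_neg _ _ _ _ hb]
      rw [show pvExtend a b (x :: tl) = (a, b) :: pvExtend x x tl by simp [pvExtend, h]]
      congr 1
      rw [pvGroups_cons]
      have := ih (j + 1) x x
      rw [hx] at this
      exact this

-- ===== VERDICT (by name: the statement is the Claim_ definition above) =====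
theorem calc_ranges_spec : Claim_equal_calc_ranges := by
  intro indexes _
  show calc_ranges indexes = calc_ranges_alt indexes
  cases indexes with
  | nil =>
    simp [calc_ranges, calc_ranges_alt, pvLoopA, PySem.List.enumerate_nil, pvGroups_nil]
  | cons x tl =>
    have hA : calc_ranges (x :: tl) = pvExtend x x tl := by
      show pvLoopA [] (x :: tl) = _
      simp only [pvLoopA, List.getLast?_nil]
      simpa using pvLoopA_append tl [] x x
    have hB : calc_ranges_alt (x :: tl) = pvGroups ((x - 0, x) :: pvKeyed (0 + 1) tl) := by
      show pvGroups (pvKeyed 0 (x :: tl)) = _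
      rw [pvKeyed_cons]
    rw [hA, hB, pvGroups_cons]
    have := pvGroups_keyed tl 1 x x
    norm_num at this ⊢
    exact this
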